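-- pv_equiv track=rewrite | github.com/guillaumehuet/AdventOfCode | 2018/20_2/solve.py | goThrough
-- ===== SOURCE A (Python) =====
-- def move(pos, dir):
--   directions = {'N' : (0, -1), 'S' : (0, 1), 'W' : (-1, 0), 'E' : (1, 0)}
--   return (pos[0] + directions[dir][0], pos[1] + directions[dir][1])
--
-- def goThrough(regex, origDistance = 0, origin = (0, 0), visited = None, distances = None):
--   visited = visited or set()
--   distances = distances or dict()
--   pos = origin
--   distance = origDistance
--   visited.add(pos)
--   distances[pos] = distance
--   c = 0
--   while c < len(regex):
--     direction = regex[c]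
--     if direction in ('N', 'S', 'W', 'E'):
--       pos = move(pos, direction)
--       if pos in visited:
--         distance = distances[pos]
--       else:
--         distance += 1
--         distances[pos] = distance
--         visited.add(pos)
--     elif direction == '|':
--       pos = origin
--       distance = origDistance
--     elif direction == '(':
--       subRegexStart = c
--       subRegexEnd = subRegexStart
--       depth = 1
--       while depth > 0:
--         subRegexEnd += 1
--         if regex[subRegexEnd] == '(':
--           depth += 1
--         elif regex[subRegexEnd] == ')':
--           depth -= 1
--       goThrough(regex[subRegexStart + 1:subRegexEnd], distance, pos, visited, distances)
--       c = subRegexEnd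
--     c += 1
--   return distances
-- ===== SOURCE B (Python) =====
-- def goThrough(regex, origDistance = 0, origin = (0, 0), visited = None, distances = None):
--   visited = visited or set()
--   distances = distances or dict()
--   deltas = {'N': (0, -1), 'S': (0, 1), 'W': (-1, 0), 'E': (1, 0)}
--   pos = origin
--   distance = origDistance
--   visited.add(pos)
--   distances[pos] = distance
--   stack = []
--   for ch in regex:
--     if ch in deltas:
--       dx, dy = deltas[ch]
--       pos = (pos[0] + dx, pos[1] + dy)
--       if pos in visited:
--         distance = distances[pos]
--       else:
--         distance += 1
--         distances[pos] = distance
--         visited.add(pos)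
--     elif ch == '|':
--       pos, distance = stack[-1] if stack else (origin, origDistance)
--     elif ch == '(':
--       stack.append((pos, distance))
--     elif ch == ')' and stack:
--       pos, distance = stack.pop()
--   return distances
-- ===== Notes on version B (the rewrite author's own statement) =====
-- stated objective: faster
-- what changed: Replaces A's recursion with a per-'(' matching-paren scan and substring slicing by a single linear pass over the regex that keeps an explicit stack of (position, distance) frames, visiting characters in the same order so the same distances dict is built.
-- outside the precondition, e.g. on goThrough('(', 0, (0, 0), None, None): A raises IndexError, B returns {(0, 0): 0}
import Mathlib
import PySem

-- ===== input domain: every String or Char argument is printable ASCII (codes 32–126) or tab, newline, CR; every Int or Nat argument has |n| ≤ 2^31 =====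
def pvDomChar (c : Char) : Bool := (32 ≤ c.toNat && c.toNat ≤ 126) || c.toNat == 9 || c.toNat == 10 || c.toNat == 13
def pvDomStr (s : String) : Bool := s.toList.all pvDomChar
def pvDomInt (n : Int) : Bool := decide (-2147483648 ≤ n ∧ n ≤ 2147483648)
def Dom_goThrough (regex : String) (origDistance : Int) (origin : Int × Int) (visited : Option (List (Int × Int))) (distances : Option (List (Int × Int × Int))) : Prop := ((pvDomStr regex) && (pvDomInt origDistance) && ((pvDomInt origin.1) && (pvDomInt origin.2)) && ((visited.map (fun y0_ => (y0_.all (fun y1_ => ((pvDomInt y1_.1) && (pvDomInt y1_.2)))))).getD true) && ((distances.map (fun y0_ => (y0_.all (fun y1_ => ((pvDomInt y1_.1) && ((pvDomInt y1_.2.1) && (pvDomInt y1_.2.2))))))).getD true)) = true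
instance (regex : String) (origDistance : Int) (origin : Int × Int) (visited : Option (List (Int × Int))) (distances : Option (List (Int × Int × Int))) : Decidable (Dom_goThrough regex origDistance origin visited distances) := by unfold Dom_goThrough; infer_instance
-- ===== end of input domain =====

-- B replaces A's recursion with per-'(' matching-paren scans and substring slicing by one linear
-- pass over the regex with an explicit stack of (position, distance) frames (objective: faster;
-- same traversal order, so the same distances dict).  The equivalence is about the RETURN value
-- only: the Python A mutates the `visited`/`distances` arguments it is given, B does the same.

-- ===== PORT A =====
abbrev PvSt := PySem.Set (Int × Int) × PySem.Dict (Int × Int) Int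

-- A's helper `move` (its dict lookup, written out for the four direction keys it is called with)
def pvMove (p : Int × Int) (d : Char) : Int × Int :=
  if d = 'N' then (p.1, p.2 - 1)
  else if d = 'S' then (p.1, p.2 + 1)
  else if d = 'W' then (p.1 - 1, p.2)
  else if d = 'E' then (p.1 + 1, p.2)
  else p

-- small arithmetic facts cited by the termination proofs below (kept as named lemmas so the
-- compiled definitions stay small)
theorem pvMeasureLt (a c : Nat) (h : c < a) : a - (c + 1) < a - c := by omega
theorem pvJumpLt (a c e : Nat) (h1 : c < a) (h2 : c ≤ e) : a - (e + 1) < a - c := by omega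
theorem pvSliceLt (s : List Char) (c e : Nat) (h : c < s.length) :
    ((s.drop (c + 1)).take (e - (c + 1))).length < s.length := by
  have h1 : ((s.drop (c + 1)).take (e - (c + 1))).length
      = min (e - (c + 1)) (s.length - (c + 1)) := by
    rw [List.length_take, List.length_drop]
  omega

-- A's inner `while depth > 0` scan for the matching ')'; `none` = Python IndexError (regex[subRegexEnd] past the end)
def pvScanA (s : List Char) (e : Nat) (depth : Int) : Option Nat :=
  if depth ≤ 0 then some e
  else if h : e + 1 < s.length then
    pvScanA s (e + 1)
      (if s[e + 1] = '(' then depth + 1 else if s[e + 1] = ')' then depth - 1 else depth)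
  else none
termination_by s.length - e
decreasing_by exact pvMeasureLt s.length e (Nat.lt_of_succ_lt h)

-- (used only for the termination of pvLoopA's jump `c = subRegexEnd`)
theorem pvScanA_le (s : List Char) (e : Nat) (depth : Int) (e' : Nat)
    (h : pvScanA s e depth = some e') : e ≤ e' := by
  fun_induction pvScanA s e depth with
  | case1 => simp_all
  | case2 => next ih => exact Nat.le_trans (by omega) (ih h)
  | case3 => simp_all

-- A's `while c < len(regex)` loop; returns (state, pos, distance).  The slice regex[c+1:e] is
-- (s.drop (c+1)).take (e-(c+1)), exact for the in-range nonnegative bounds produced by the scan.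
def pvLoopA (s : List Char) (c : Nat) (pos : Int × Int) (dist : Int)
    (o : Int × Int) (d0 : Int) (st : PvSt) : PvSt × (Int × Int) × Int :=
  if h : c < s.length then
    if s[c] = 'N' ∨ s[c] = 'S' ∨ s[c] = 'W' ∨ s[c] = 'E' then
      if PySem.Set.contains st.1 (pvMove pos s[c]) then
        pvLoopA s (c + 1) (pvMove pos s[c]) (st.2.getD (pvMove pos s[c]) 0) o d0 st
      else
        pvLoopA s (c + 1) (pvMove pos s[c]) (dist + 1) o d0
          (PySem.Set.add st.1 (pvMove pos s[c]), st.2.insert (pvMove pos s[c]) (dist + 1))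
    else if s[c] = '|' then
      pvLoopA s (c + 1) o d0 o d0 st
    else if s[c] = '(' then
      match hm : pvScanA s c 1 with
      | none => (st, pos, dist)   -- Python raises IndexError here; excluded by Pre_
      | some e =>
        -- recursive goThrough(regex[c+1:e], distance, pos, visited, distances), inlined:
        -- it first re-marks its origin (visited.add / distances[pos] = distance), then loops
        pvLoopA s (e + 1) pos dist o d0
          (pvLoopA ((s.drop (c + 1)).take (e - (c + 1))) 0 pos dist pos dist
            (PySem.Set.add st.1 pos, st.2.insert pos dist)).1
    else
      pvLoopA s (c + 1) pos dist o d0 st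
  else (st, pos, dist)
termination_by (s.length, s.length - c)
decreasing_by
  · exact Prod.Lex.right _ (pvMeasureLt s.length c h)
  · exact Prod.Lex.right _ (pvMeasureLt s.length c h)
  · exact Prod.Lex.right _ (pvMeasureLt s.length c h)
  · exact Prod.Lex.left _ _ (pvSliceLt s c e h)
  · exact Prod.Lex.right _ (pvJumpLt s.length c e h (pvScanA_le s c 1 e hm))
  · exact Prod.Lex.right _ (pvMeasureLt s.length c h)

-- `visited or set()` / `distances or dict()`: None and the empty collection both give a fresh
-- empty one, so both map through getD [].  A dict argument is its association list, built as
-- the Python dict is (later duplicate keys overwrite in place).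
def goThrough (regex : String) (origDistance : Int) (origin : Int × Int)
    (visited : Option (List (Int × Int))) (distances : Option (List (Int × Int × Int))) :
    List (Int × Int × Int) :=
  ((pvLoopA regex.toList 0 origin origDistance origin origDistance
      (PySem.Set.add (PySem.Set.ofList (visited.getD [])) origin,
       (PySem.Dict.ofList ((distances.getD []).map (fun t => ((t.1, t.2.1), t.2.2)))).insert
         origin origDistance)).1).2.items.map (fun kv => (kv.1.1, kv.1.2, kv.2))

-- ===== PORT B =====
-- B's `deltas` lookup for the four direction characters
def pvStep (p : Int × Int) (d : Char) : Int × Int :=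
  if d = 'N' then (p.1, p.2 - 1)
  else if d = 'S' then (p.1, p.2 + 1)
  else if d = 'W' then (p.1 - 1, p.2)
  else if d = 'E' then (p.1 + 1, p.2)
  else p

-- B's single `for ch in regex` loop with its explicit stack of (position, distance) frames
def pvLoopB : List Char → (Int × Int) → Int → List ((Int × Int) × Int) →
    (Int × Int) → Int → PvSt → PvSt
  | [], _, _, _, _, _, st => st
  | ch :: rest, pos, dist, stk, o, d0, st =>
    if ch = 'N' ∨ ch = 'S' ∨ ch = 'W' ∨ ch = 'E' then
      if PySem.Set.contains st.1 (pvStep pos ch) then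
        pvLoopB rest (pvStep pos ch) (st.2.getD (pvStep pos ch) 0) stk o d0 st
      else
        pvLoopB rest (pvStep pos ch) (dist + 1) stk o d0
          (PySem.Set.add st.1 (pvStep pos ch), st.2.insert (pvStep pos ch) (dist + 1))
    else if ch = '|' then
      pvLoopB rest (stk.head?.getD (o, d0)).1 (stk.head?.getD (o, d0)).2 stk o d0 st
    else if ch = '(' then
      pvLoopB rest pos dist ((pos, dist) :: stk) o d0 st
    else if ch = ')' then
      match stk with                       -- `elif ch == ')' and stack:`
      | f :: stk' => pvLoopB rest f.1 f.2 stk' o d0 st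
      | [] => pvLoopB rest pos dist [] o d0 st
    else
      pvLoopB rest pos dist stk o d0 st

def goThrough_alt (regex : String) (origDistance : Int) (origin : Int × Int)
    (visited : Option (List (Int × Int))) (distances : Option (List (Int × Int × Int))) :
    List (Int × Int × Int) :=
  ((pvLoopB regex.toList origin origDistance [] origin origDistance
      (PySem.Set.add (PySem.Set.ofList (visited.getD [])) origin,
       (PySem.Dict.ofList ((distances.getD []).map (fun t => ((t.1, t.2.1), t.2.2)))).insert
         origin origDistance)).2).items.map (fun kv => (kv.1.1, kv.1.2, kv.2))

-- ===== PRECONDITION & SPEC =====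
-- Python's clamped paren counter: a ')' with no open '(' is ignored (as A ignores such a char)
def pvCStep (k : Nat) (ch : Char) : Nat :=
  if ch = '(' then k + 1 else if ch = ')' then k - 1 else k
def pvCBal (l : List Char) : Nat := l.foldl pvCStep 0

-- L1 distance between two positions (the walk moves one step per character, so it stays within
-- regex-length L1 distance of the origin)
def pvL1 (o p : Int × Int) : Nat := (p.1 - o.1).natAbs + (p.2 - o.2).natAbs

-- Pre_ excludes regexes with an unmatched '(' (A raises IndexError in its matching-paren scan)
-- and inputs whose visited set holds a position absent from distances yet within walking range
-- (L1 distance ≤ regex length) of the origin — there A raises KeyError if the walk re-enters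
-- it; where A still returns, B returns the same value (see the cite).
def Pre_goThrough (regex : String) (origDistance : Int) (origin : Int × Int)
    (visited : Option (List (Int × Int))) (distances : Option (List (Int × Int × Int))) : Prop :=
  pvCBal regex.toList = 0 ∧
  ∀ p ∈ visited.getD [],
    p ∈ (distances.getD []).map (fun t => (t.1, t.2.1)) ∨ regex.toList.length < pvL1 origin p
instance (regex : String) (origDistance : Int) (origin : Int × Int) (visited : Option (List (Int × Int))) (distances : Option (List (Int × Int × Int))) : Decidable (Pre_goThrough regex origDistance origin visited distances) := by unfold Pre_goThrough; infer_instance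

def pvWitness_goThrough : String × Int × (Int × Int) × (Option (List (Int × Int))) × (Option (List (Int × Int × Int))) :=
  ("N(E|W)N", 0, (0, 0), some [(0, 0)], some [(0, 0, 5)])

def Spec_goThrough (regex : String) (origDistance : Int) (origin : Int × Int) (visited : Option (List (Int × Int))) (distances : Option (List (Int × Int × Int))) (out : List (Int × Int × Int)) : Prop := out = goThrough_alt regex origDistance origin visited distances
instance (regex : String) (origDistance : Int) (origin : Int × Int) (visited : Option (List (Int × Int))) (distances : Option (List (Int × Int × Int))) (out : List (Int × Int × Int)) : Decidable (Spec_goThrough regex origDistance origin visited distances out) := by unfold Spec_goThrough; infer_instance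

-- ===== CLAIM (what is proved, stated in full; the proofs are below) =====
def Claim_equal_goThrough : Prop := ∀ (regex : String) (origDistance : Int) (origin : Int × Int) (visited : Option (List (Int × Int))) (distances : Option (List (Int × Int × Int))), Dom_goThrough regex origDistance origin visited distances → Pre_goThrough regex origDistance origin visited distances → Spec_goThrough regex origDistance origin visited distances (goThrough regex origDistance origin visited distances)

-- ===== LEMMAS AND PROOFS =====

-- raw paren weight and balance of a segment
def pvW (ch : Char) : Int := if ch = '(' then 1 else if ch = ')' then -1 else 0
def pvRB (l : List Char) : Int := (l.map pvW).sum

theorem pvRB_nil : pvRB [] = 0 := rfl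
theorem pvRB_cons (ch : Char) (l : List Char) : pvRB (ch :: l) = pvW ch + pvRB l := by
  simp [pvRB]
theorem pvRB_append (a b : List Char) : pvRB (a ++ b) = pvRB a + pvRB b := by
  simp [pvRB]

-- prefix-nonnegative and balanced ("a well-formed group body")
def pvNNB (l : List Char) : Prop := (∀ m : Nat, 0 ≤ pvRB (l.take m)) ∧ pvRB l = 0

-- state invariants
def pvGood (st : PvSt) (f : (Int × Int) × Int) : Prop :=
  f.1 ∈ st.1 ∧ st.2.get? f.1 = some f.2
def pvKeyed (O : Int × Int) (N : Nat) (st : PvSt) : Prop :=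
  st.2.keys.Nodup ∧ ∀ p ∈ st.1, (∃ v, st.2.get? p = some v) ∨ N < pvL1 O p

-- one move changes the L1 distance to the global origin by at most one
theorem pvL1_move (O p : Int × Int) (ch : Char) : pvL1 O (pvMove p ch) ≤ pvL1 O p + 1 := by
  unfold pvMove pvL1
  split_ifs <;> simp <;> omega

theorem pvStep_eq_pvMove (p : Int × Int) (d : Char) : pvStep p d = pvMove p d := rfl

theorem pvSet_add_self (s : PySem.Set (Int × Int)) (x : Int × Int) (h : x ∈ s) :
    PySem.Set.add s x = s := by
  simp [PySem.Set.add, h]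

theorem pvDict_insert_self (d : PySem.Dict (Int × Int) Int) (k : Int × Int) (v : Int)
    (hnd : d.keys.Nodup) (h : d.get? k = some v) : d.insert k v = d := by
  have hc : d.contains k = true := by
    rw [PySem.Dict.contains_eq_isSome_get?, h]; rfl
  have hmap : d.items.map (fun p => if (p.1 == k) = true then (k, v) else p) = d.items := by
    have hcong : ∀ p ∈ d.items, (if (p.1 == k) = true then (k, v) else p) = id p := by
      intro p hp
      obtain ⟨a, b⟩ := p
      by_cases hpk : a = k
      · subst hpk
        have h2 : d.get? a = some b := PySem.Dict.get?_of_mem_items d hp hnd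
        rw [h] at h2
        injection h2 with hb
        simp [id, hb]
      · simp [hpk, id]
    rw [List.map_congr_left hcong, List.map_id]
  simp only [PySem.Dict.insert, hc, if_true, hmap]

-- the first return of the paren counter to zero splits off a well-formed group body
theorem pvFirstZero : ∀ (r : List Char) (d : Int), 0 < d → d + pvRB r ≤ 0 →
    ∃ g t, r = g ++ ')' :: t ∧ (∀ m : Nat, 0 < d + pvRB (g.take m)) ∧ d + pvRB g = 1 := by
  intro r
  induction r with
  | nil => intro d hd hle; simp [pvRB_nil] at hle; omega
  | cons c r' ih =>
    intro d hd hle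
    by_cases hc : c = ')' ∧ d = 1
    · exact ⟨[], r', by simp [hc.1], fun m => by simpa [pvRB_nil] using hc.2 ▸ (by omega : (0:Int) < 1), by simp [pvRB_nil, hc.2]⟩
    · have hd' : 0 < d + pvW c := by
        by_cases h1 : c = '('
        · simp [pvW, h1]; omega
        · by_cases h2 : c = ')'
          · have : d ≠ 1 := fun h => hc ⟨h2, h⟩
            simp [pvW, h1, h2]; omega
          · simp [pvW, h1, h2]; omega
      have hle' : (d + pvW c) + pvRB r' ≤ 0 := by
        rw [pvRB_cons] at hle; omega
      obtain ⟨g, t, hgt, hpref, htot⟩ := ih (d + pvW c) hd' hle'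
      refine ⟨c :: g, t, by simp [hgt], ?_, by rw [pvRB_cons]; omega⟩
      intro m
      cases m with
      | zero => simpa [pvRB_nil] using hd
      | succ m => rw [List.take_succ_cons, pvRB_cons]; have := hpref m; omega

-- a clamp-balanced string starting with '(' splits as '(' body ')' rest, rest clamp-balanced
theorem pvCBal_decomp : ∀ (r : List Char) (k : Nat), 0 < k →
    r.foldl pvCStep k = 0 →
    ∃ g t, r = g ++ ')' :: t ∧ (∀ m : Nat, 0 < (k : Int) + pvRB (g.take m)) ∧
      (k : Int) + pvRB g = 1 ∧ pvCBal t = 0 := by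
  intro r
  induction r with
  | nil => intro k hk h; simp at h; omega
  | cons c r' ih =>
    intro k hk h
    rw [List.foldl_cons] at h
    by_cases hc : c = ')' ∧ k = 1
    · refine ⟨[], r', by simp [hc.1], fun m => by simp [pvRB_nil]; omega, by simp [pvRB_nil, hc.2], ?_⟩
      have : pvCStep k c = 0 := by simp [pvCStep, hc.1, hc.2]
      rwa [this] at h
    · have hk' : 0 < pvCStep k c := by
        by_cases h1 : c = '('
        · simp [pvCStep, h1]
        · by_cases h2 : c = ')'
          · have : k ≠ 1 := fun hh => hc ⟨h2, hh⟩
            simp [pvCStep, h1, h2]; omega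
          · simp [pvCStep, h1, h2]; omega
      obtain ⟨g, t, hgt, hpref, htot, hcb⟩ := ih (pvCStep k c) hk' h
      have hstep : ((pvCStep k c : Nat) : Int) = (k : Int) + pvW c := by
        by_cases h1 : c = '('
        · simp [pvCStep, pvW, h1]
        · by_cases h2 : c = ')'
          · have : k ≠ 1 := fun hh => hc ⟨h2, hh⟩
            simp [pvCStep, pvW, h1, h2]; omega
          · simp [pvCStep, pvW, h1, h2]
      refine ⟨c :: g, t, by simp [hgt], ?_, by rw [pvRB_cons]; omega, hcb⟩
      intro m
      cases m with
      | zero => simp [pvRB_nil]; omega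
      | succ m => rw [List.take_succ_cons, pvRB_cons]; have := hpref m; omega

-- nnb versions of the step facts
theorem pvNNB_tail (ch : Char) (r : List Char) (hw : pvW ch = 0) (h : pvNNB (ch :: r)) :
    pvNNB r := by
  obtain ⟨hpref, htot⟩ := h
  constructor
  · intro m
    have := hpref (m + 1)
    rwa [List.take_succ_cons, pvRB_cons, hw, zero_add] at this
  · rw [pvRB_cons, hw, zero_add] at htot; exact htot

theorem pvNNB_not_rparen (r : List Char) (h : pvNNB (')' :: r)) : False := by
  have := h.1 1
  simp [pvRB_cons, pvRB_nil, pvW] at this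

theorem pvNNB_decomp (r : List Char) (h : pvNNB ('(' :: r)) :
    ∃ g t, r = g ++ ')' :: t ∧ (∀ m : Nat, 0 < 1 + pvRB (g.take m)) ∧
      1 + pvRB g = 1 ∧ pvNNB t := by
  obtain ⟨hpref, htot⟩ := h
  rw [pvRB_cons] at htot
  have hw : pvW '(' = 1 := rfl
  have hle : (1 : Int) + pvRB r ≤ 0 := by omega
  obtain ⟨g, t, hgt, hp, ht⟩ := pvFirstZero r 1 (by omega) hle
  have hrbg : pvRB g = 0 := by omega
  refine ⟨g, t, hgt, hp, by omega, ?_, ?_⟩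
  · -- prefixes of t are nonnegative
    intro m
    have hpm := hpref (g.length + 1 + m + 1)
    rw [List.take_succ_cons, pvRB_cons, hgt] at hpm
    have htk : (g ++ ')' :: t).take (g.length + 1 + m) = g ++ ')' :: t.take m := by
      rw [List.take_append]
      have h1 : g.take (g.length + 1 + m) = g := List.take_of_length_le (by omega)
      have h2 : g.length + 1 + m - g.length = m + 1 := by omega
      rw [h1, h2, List.take_succ_cons]
    rw [htk, pvRB_append, pvRB_cons, hrbg] at hpm
    simp [pvW] at hpm
    omega
  · -- t is balanced
    rw [hgt, pvRB_append, pvRB_cons, hrbg] at htot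
    simp [pvW] at htot
    omega

-- A's scan finds exactly the split-off group body
theorem pvScan_of_decomp : ∀ (g : List Char) (s : List Char) (e : Nat) (d : Int) (t : List Char),
    s.drop (e + 1) = g ++ ')' :: t → (∀ m : Nat, 0 < d + pvRB (g.take m)) → d + pvRB g = 1 →
    pvScanA s e d = some (e + 1 + g.length) := by
  intro g
  induction g with
  | nil =>
    intro s e d t hdrop hpref htot
    have hd : d = 1 := by simpa [pvRB_nil] using htot
    have hlen : e + 1 < s.length := by
      have := congrArg List.length hdrop
      simp [List.length_drop] at this
      omega
    have hge : s[e + 1] = ')' := by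
      have h0 : s[e + 1 + 0]? = some ')' := by
        rw [← List.getElem?_drop, hdrop]; rfl
      simp only [Nat.add_zero] at h0
      exact (List.getElem_eq_iff hlen).2 h0
    subst hd
    rw [pvScanA, if_neg (by omega), dif_pos hlen]
    rw [hge]
    rw [show (if (')' : Char) = '(' then (1 : Int) + 1
        else if (')' : Char) = ')' then 1 - 1 else 1) = 0 by decide]
    rw [pvScanA]
    simp
  | cons c g' ih =>
    intro s e d t hdrop hpref htot
    have hd : 0 < d := by simpa [pvRB_nil] using hpref 0
    have hlen : e + 1 < s.length := by
      have := congrArg List.length hdrop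
      simp [List.length_drop] at this
      omega
    have hge : s[e + 1] = c := by
      have h0 : s[e + 1 + 0]? = some c := by
        rw [← List.getElem?_drop, hdrop]; rfl
      simp only [Nat.add_zero] at h0
      exact (List.getElem_eq_iff hlen).2 h0
    have hdrop' : s.drop (e + 1 + 1) = g' ++ ')' :: t := by
      have h1 : (s.drop (e + 1)).drop 1 = s.drop (e + 1 + 1) := by
        rw [List.drop_drop]
      rw [← h1, hdrop]
      rfl
    have hstep : (if c = '(' then d + 1 else if c = ')' then d - 1 else d) = d + pvW c := by
      by_cases h1 : c = '('
      · simp [pvW, h1]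
      · by_cases h2 : c = ')'
        · simp [pvW, h1, h2, Int.sub_eq_add_neg]
        · simp [pvW, h1, h2]
    have hrec := ih s (e + 1) (d + pvW c) t hdrop'
      (fun m => by have := hpref (m + 1); rw [List.take_succ_cons, pvRB_cons] at this; omega)
      (by rw [pvRB_cons] at htot; omega)
    rw [pvScanA, if_neg (by omega), dif_pos hlen]
    simp only [hge, hstep, hrec]
    congr 1
    simp [List.length_cons]
    omega

-- A's loop only grows visited, never rewrites an existing distance, and keeps keys unique
-- A's loop only grows visited, never rewrites an existing distance, keeps keys unique, and
-- keeps every visited position either keyed or out of walking range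
theorem pvLoopA_pres (O : Int × Int) (N : Nat) (s : List Char) (c : Nat) (pos : Int × Int)
    (dist : Int) (o : Int × Int) (d0 : Int) (st : PvSt)
    (hk : pvKeyed O N st) (hp : pvGood st (pos, dist)) (ho : pvGood st (o, d0))
    (hbp : pvL1 O pos + (s.length - c) ≤ N) (hbo : pvL1 O o + (s.length - c) ≤ N) :
    pvKeyed O N (pvLoopA s c pos dist o d0 st).1 ∧
      (∀ f, pvGood st f → pvGood (pvLoopA s c pos dist o d0 st).1 f) := by
  fun_induction pvLoopA s c pos dist o d0 st with
  | case1 s c pos dist o d0 st h hdir hmem ih =>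
    -- move onto an already-visited position: it is within range, hence keyed
    have hmemP : pvMove pos s[c] ∈ st.1 := (PySem.Set.contains_iff _ _).1 hmem
    have hmv := pvL1_move O pos s[c]
    have hnear : ¬ (N < pvL1 O (pvMove pos s[c])) := by omega
    obtain ⟨v, hv⟩ := (hk.2 _ hmemP).resolve_right hnear
    have hgd : st.2.getD (pvMove pos s[c]) 0 = v := PySem.Dict.getD_of_get?_eq_some _ _ hv
    exact ih hk ⟨hmemP, by rw [hgd]; exact hv⟩ ho (by omega) (by omega)
  | case2 s c pos dist o d0 st h hdir hmem ih =>
    -- move onto a new position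
    have hmemN : pvMove pos s[c] ∉ st.1 := fun hx => hmem ((PySem.Set.contains_iff _ _).2 hx)
    have hmv := pvL1_move O pos s[c]
    have hk' : pvKeyed O N (PySem.Set.add st.1 (pvMove pos s[c]),
        st.2.insert (pvMove pos s[c]) (dist + 1)) := by
      constructor
      · exact PySem.Dict.nodup_keys_insert _ _ _ hk.1
      · intro p hpm
        rcases (PySem.Set.mem_add _ _ _).1 hpm with hps | hpe
        · rcases hk.2 p hps with ⟨v, hv⟩ | hfar
          · have hne : p ≠ pvMove pos s[c] := fun he => hmemN (he ▸ hps)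
            exact Or.inl ⟨v, by rw [PySem.Dict.get?_insert_of_ne _ _ hne]; exact hv⟩
          · exact Or.inr hfar
        · exact Or.inl ⟨dist + 1, by rw [hpe]; exact PySem.Dict.get?_insert_self _ _ _⟩
    have hpres : ∀ f, pvGood st f → pvGood (PySem.Set.add st.1 (pvMove pos s[c]),
        st.2.insert (pvMove pos s[c]) (dist + 1)) f := by
      intro f hf
      have hne : f.1 ≠ pvMove pos s[c] := fun he => hmemN (he ▸ hf.1)
      exact ⟨(PySem.Set.mem_add _ _ _).2 (Or.inl hf.1),
        by rw [PySem.Dict.get?_insert_of_ne _ _ hne]; exact hf.2⟩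
    obtain ⟨hk2, hpres2⟩ := ih hk'
      ⟨(PySem.Set.mem_add _ _ _).2 (Or.inr rfl), PySem.Dict.get?_insert_self _ _ _⟩
      (hpres _ ho) (by omega) (by omega)
    exact ⟨hk2, fun f hf => hpres2 f (hpres f hf)⟩
  | case3 s c pos dist o d0 st h hdir hbar ih => exact ih hk ho ho (by omega) (by omega)
  | case4 s c pos dist o d0 st h hdir hbar hpar hm =>
    exact ⟨hk, fun f hf => hf⟩
  | case5 s c pos dist o d0 st h hdir hbar hpar e hm ih1 ih2 =>
    have hgl : ((s.drop (c + 1)).take (e - (c + 1))).length ≤ s.length - (c + 1) := by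
      have h1 : ((s.drop (c + 1)).take (e - (c + 1))).length
          = min (e - (c + 1)) (s.length - (c + 1)) := by
        rw [List.length_take, List.length_drop]
      omega
    have hce := pvScanA_le s c 1 e hm
    have hst1 : (PySem.Set.add st.1 pos, st.2.insert pos dist) = st := by
      have h1 := pvSet_add_self st.1 pos hp.1
      have h2 := pvDict_insert_self st.2 pos dist hk.1 hp.2
      cases st; simp_all
    rw [hst1] at ih1 ih2 ⊢
    obtain ⟨hk1, hpres1⟩ := ih1 hk hp hp (by omega) (by omega)
    obtain ⟨hk2, hpres2⟩ := ih2 hk1 (hpres1 _ hp) (hpres1 _ ho) (by omega) (by omega)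
    exact ⟨hk2, fun f hf => hpres2 f (hpres1 f hf)⟩
  | case6 s c pos dist o d0 st h hdir hbar hpar ih =>
    exact ih hk hp ho (by omega) (by omega)
  | case7 s c pos dist o d0 st h => exact ⟨hk, fun f hf => hf⟩

-- ==== the simulation lemma: B's linear stack pass tracks A's recursive walk ====
theorem pvM (O : Int × Int) (N : Nat) (s : List Char) (c : Nat) (pos : Int × Int) (dist : Int)
    (o : Int × Int) (d0 : Int) (st : PvSt) :
    ∀ (ob : Int × Int) (db : Int) (stk : List ((Int × Int) × Int)) (rest : List Char),
    ((stk = [] ∧ ob = o ∧ db = d0 ∧ pvCBal (s.drop c) = 0) ∨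
      (stk.head? = some (o, d0) ∧ pvNNB (s.drop c))) →
    pvKeyed O N st → pvGood st (pos, dist) → pvGood st (o, d0) →
    (∀ f ∈ stk, pvGood st f) →
    pvL1 O pos + (s.length - c) ≤ N → pvL1 O o + (s.length - c) ≤ N →
    pvLoopB (s.drop c ++ rest) pos dist stk ob db st
      = pvLoopB rest (pvLoopA s c pos dist o d0 st).2.1 (pvLoopA s c pos dist o d0 st).2.2
          stk ob db (pvLoopA s c pos dist o d0 st).1 := by
  fun_induction pvLoopA s c pos dist o d0 st with
  | case1 s c pos dist o d0 st h hdir hmem ih =>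
    intro ob db stk rest h1 hk hp ho hstk hbp hbo
    have hdc : s.drop c = s[c] :: s.drop (c + 1) := List.drop_eq_getElem_cons h
    have hw0 : pvW s[c] = 0 := by
      rcases hdir with h' | h' | h' | h' <;> simp [pvW, h']
    have hc0 : pvCStep 0 s[c] = 0 := by
      rcases hdir with h' | h' | h' | h' <;> simp [pvCStep, h']
    have h1' : (stk = [] ∧ ob = o ∧ db = d0 ∧ pvCBal (s.drop (c + 1)) = 0) ∨
        (stk.head? = some (o, d0) ∧ pvNNB (s.drop (c + 1))) := by
      rcases h1 with ⟨he, ho1, ho2, hcb⟩ | ⟨hh, hnnb⟩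
      · refine Or.inl ⟨he, ho1, ho2, ?_⟩
        rw [hdc] at hcb
        simpa only [pvCBal, List.foldl_cons, hc0] using hcb
      · exact Or.inr ⟨hh, pvNNB_tail _ _ hw0 (hdc ▸ hnnb)⟩
    have hmemP : pvMove pos s[c] ∈ st.1 := (PySem.Set.contains_iff _ _).1 hmem
    have hmv := pvL1_move O pos s[c]
    have hnear : ¬ (N < pvL1 O (pvMove pos s[c])) := by omega
    obtain ⟨v, hv⟩ := (hk.2 _ hmemP).resolve_right hnear
    have hgd : st.2.getD (pvMove pos s[c]) 0 = v := PySem.Dict.getD_of_get?_eq_some _ _ hv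
    rw [hdc]
    simp only [List.cons_append, pvLoopB, hdir, if_true, pvStep_eq_pvMove, hmem]
    exact ih ob db stk rest h1' hk ⟨hmemP, by rw [hgd]; exact hv⟩ ho hstk (by omega) (by omega)
  | case2 s c pos dist o d0 st h hdir hmem ih =>
    intro ob db stk rest h1 hk hp ho hstk hbp hbo
    have hdc : s.drop c = s[c] :: s.drop (c + 1) := List.drop_eq_getElem_cons h
    have hw0 : pvW s[c] = 0 := by
      rcases hdir with h' | h' | h' | h' <;> simp [pvW, h']
    have hc0 : pvCStep 0 s[c] = 0 := by
      rcases hdir with h' | h' | h' | h' <;> simp [pvCStep, h']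
    have h1' : (stk = [] ∧ ob = o ∧ db = d0 ∧ pvCBal (s.drop (c + 1)) = 0) ∨
        (stk.head? = some (o, d0) ∧ pvNNB (s.drop (c + 1))) := by
      rcases h1 with ⟨he, ho1, ho2, hcb⟩ | ⟨hh, hnnb⟩
      · refine Or.inl ⟨he, ho1, ho2, ?_⟩
        rw [hdc] at hcb
        simpa only [pvCBal, List.foldl_cons, hc0] using hcb
      · exact Or.inr ⟨hh, pvNNB_tail _ _ hw0 (hdc ▸ hnnb)⟩
    have hmemN : pvMove pos s[c] ∉ st.1 := fun hx => hmem ((PySem.Set.contains_iff _ _).2 hx)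
    have hmv := pvL1_move O pos s[c]
    have hk' : pvKeyed O N (PySem.Set.add st.1 (pvMove pos s[c]),
        st.2.insert (pvMove pos s[c]) (dist + 1)) := by
      constructor
      · exact PySem.Dict.nodup_keys_insert _ _ _ hk.1
      · intro p hpm
        rcases (PySem.Set.mem_add _ _ _).1 hpm with hps | hpe
        · rcases hk.2 p hps with ⟨v, hv⟩ | hfar
          · have hne : p ≠ pvMove pos s[c] := fun he => hmemN (he ▸ hps)
            exact Or.inl ⟨v, by rw [PySem.Dict.get?_insert_of_ne _ _ hne]; exact hv⟩
          · exact Or.inr hfar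
        · exact Or.inl ⟨dist + 1, by rw [hpe]; exact PySem.Dict.get?_insert_self _ _ _⟩
    have hpres : ∀ f, pvGood st f → pvGood (PySem.Set.add st.1 (pvMove pos s[c]),
        st.2.insert (pvMove pos s[c]) (dist + 1)) f := by
      intro f hf
      have hne : f.1 ≠ pvMove pos s[c] := fun he => hmemN (he ▸ hf.1)
      exact ⟨(PySem.Set.mem_add _ _ _).2 (Or.inl hf.1),
        by rw [PySem.Dict.get?_insert_of_ne _ _ hne]; exact hf.2⟩
    rw [hdc]
    simp only [List.cons_append, pvLoopB, hdir, if_true, pvStep_eq_pvMove,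
      Bool.eq_false_iff.2 hmem, Bool.false_eq_true, if_false]
    exact ih ob db stk rest h1' hk'
      ⟨(PySem.Set.mem_add _ _ _).2 (Or.inr rfl), PySem.Dict.get?_insert_self _ _ _⟩
      (hpres _ ho) (fun f hf => hpres f (hstk f hf)) (by omega) (by omega)
  | case3 s c pos dist o d0 st h hdir hbar ih =>
    intro ob db stk rest h1 hk hp ho hstk hbp hbo
    have hdc : s.drop c = s[c] :: s.drop (c + 1) := List.drop_eq_getElem_cons h
    have hw0 : pvW s[c] = 0 := by simp [pvW, hbar]
    have hc0 : pvCStep 0 s[c] = 0 := by simp [pvCStep, hbar]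
    have h1' : (stk = [] ∧ ob = o ∧ db = d0 ∧ pvCBal (s.drop (c + 1)) = 0) ∨
        (stk.head? = some (o, d0) ∧ pvNNB (s.drop (c + 1))) := by
      rcases h1 with ⟨he, ho1, ho2, hcb⟩ | ⟨hh, hnnb⟩
      · refine Or.inl ⟨he, ho1, ho2, ?_⟩
        rw [hdc] at hcb
        simpa only [pvCBal, List.foldl_cons, hc0] using hcb
      · exact Or.inr ⟨hh, pvNNB_tail _ _ hw0 (hdc ▸ hnnb)⟩
    have hhead : (stk.head?.getD (ob, db)) = (o, d0) := by
      rcases h1 with ⟨he, ho1, ho2, _⟩ | ⟨hh, _⟩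
      · simp [he, ho1, ho2]
      · simp [hh]
    rw [hdc]
    simp only [List.cons_append, pvLoopB, hdir, hbar, if_true, if_false, hhead]
    exact ih ob db stk rest h1' hk ho ho hstk (by omega) (by omega)
  | case4 s c pos dist o d0 st h hdir hbar hpar hm =>
    -- scan failure is impossible under either balance hypothesis
    intro ob db stk rest h1 hk hp ho hstk hbp hbo
    exfalso
    have hdc : s.drop c = s[c] :: s.drop (c + 1) := List.drop_eq_getElem_cons h
    rcases h1 with ⟨_, _, _, hcb⟩ | ⟨_, hnnb⟩
    · rw [hdc, hpar] at hcb
      have hf : (s.drop (c + 1)).foldl pvCStep 1 = 0 := by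
        simpa only [pvCBal, List.foldl_cons, pvCStep, if_true] using hcb
      obtain ⟨g, t, hgt, hpref, htot, _⟩ := pvCBal_decomp _ 1 (by omega) hf
      have hs := pvScan_of_decomp g s c 1 t (by rw [hgt]) (by simpa using hpref)
        (by simpa using htot)
      exact Option.some_ne_none _ (hs.symm.trans hm)
    · rw [hdc, hpar] at hnnb
      obtain ⟨g, t, hgt, hpref, htot, _⟩ := pvNNB_decomp _ hnnb
      have hs := pvScan_of_decomp g s c 1 t (by rw [hgt]) hpref htot
      exact Option.some_ne_none _ (hs.symm.trans hm)
  | case5 s c pos dist o d0 st h hdir hbar hpar e hm ih1 ih2 =>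
    intro ob db stk rest h1 hk hp ho hstk hbp hbo
    have hdc : s.drop c = s[c] :: s.drop (c + 1) := List.drop_eq_getElem_cons h
    -- decompose the suffix after '(' as g ++ ')' :: t
    obtain ⟨g, t, hgt, hpref, htot, hrest⟩ :
        ∃ g t, s.drop (c + 1) = g ++ ')' :: t ∧ (∀ m : Nat, 0 < 1 + pvRB (g.take m)) ∧
          1 + pvRB g = 1 ∧ ((stk = [] ∧ ob = o ∧ db = d0 ∧ pvCBal t = 0) ∨
            (stk.head? = some (o, d0) ∧ pvNNB t)) := by
      rcases h1 with ⟨he, ho1, ho2, hcb⟩ | ⟨hh, hnnb⟩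
      · rw [hdc, hpar] at hcb
        have hf : (s.drop (c + 1)).foldl pvCStep 1 = 0 := by
          simpa only [pvCBal, List.foldl_cons, pvCStep, if_true] using hcb
        obtain ⟨g, t, hgt, hpref, htot, hcbt⟩ := pvCBal_decomp _ 1 (by omega) hf
        exact ⟨g, t, hgt, by simpa using hpref, by simpa using htot,
          Or.inl ⟨he, ho1, ho2, hcbt⟩⟩
      · rw [hdc, hpar] at hnnb
        obtain ⟨g, t, hgt, hpref, htot, hnnbt⟩ := pvNNB_decomp _ hnnb
        exact ⟨g, t, hgt, hpref, htot, Or.inr ⟨hh, hnnbt⟩⟩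
    have hscan := pvScan_of_decomp g s c 1 t (by rw [hgt]) hpref htot
    have he : e = c + 1 + g.length := by
      have h2 := hm.symm.trans hscan
      injection h2
    -- length bookkeeping for the budget
    have hlen : s.length - (c + 1) = g.length + 1 + t.length := by
      have h2 := congrArg List.length hgt
      simp [List.length_drop] at h2
      omega
    -- the slice regex[c+1:e] is exactly g
    have hslice : (s.drop (c + 1)).take (e - (c + 1)) = g := by
      rw [hgt, he]
      have harith : c + 1 + g.length - (c + 1) = g.length := by omega
      rw [harith]
      exact List.take_left
    -- the suffix after the matching ')' is exactly t
    have hdropt : s.drop (e + 1) = t := by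
      have h1' : s.drop (e + 1) = (s.drop (c + 1)).drop (g.length + 1) := by
        rw [List.drop_drop]
        congr 1
        omega
      rw [h1', hgt]
      have hassoc : g ++ ')' :: t = (g ++ [')']) ++ t := by simp
      rw [hassoc]
      have hlen2 : (g ++ [')']).length = g.length + 1 := by simp
      rw [← hlen2, List.drop_left]
    -- A's re-marking of the group origin is a no-op
    have hst1 : (PySem.Set.add st.1 pos, st.2.insert pos dist) = st := by
      have h1' := pvSet_add_self st.1 pos hp.1
      have h2' := pvDict_insert_self st.2 pos dist hk.1 hp.2
      cases st; simp_all
    rw [hst1] at ih1 ih2 ⊢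
    rw [hslice] at ih1 ih2 ⊢
    have hnnbg : pvNNB g := by
      refine ⟨fun m => ?_, by omega⟩
      have := hpref m; omega
    -- B: push the frame, walk g (IH1), pop at ')', walk t (IH2)
    rw [hdc, hpar]
    simp only [List.cons_append, pvLoopB, if_false, if_true]
    rw [hgt]
    have hassoc : (g ++ ')' :: t) ++ rest = List.drop 0 g ++ (')' :: (t ++ rest)) := by simp
    rw [hassoc]
    have hIH1 := ih1 ob db ((pos, dist) :: stk) (')' :: (t ++ rest))
      (Or.inr ⟨rfl, by simpa using hnnbg⟩) hk hp hp
      (by intro f hf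
          rcases List.mem_cons.1 hf with hf | hf
          · exact hf ▸ hp
          · exact hstk f hf)
      (by omega) (by omega)
    rw [hIH1]
    simp only [pvLoopB, if_false, if_true]
    obtain ⟨hk2, hpres2⟩ := pvLoopA_pres O N g 0 pos dist pos dist st hk hp hp
      (by omega) (by omega)
    have hIH2 := ih2 ob db stk rest
      (by rw [hdropt]; exact hrest)
      hk2 (hpres2 _ hp) (hpres2 _ ho) (fun f hf => hpres2 f (hstk f hf))
      (by omega) (by omega)
    rw [hdropt] at hIH2
    exact hIH2
  | case6 s c pos dist o d0 st h hdir hbar hpar ih =>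
    -- a non-command character: A skips it; it is ')' only with an empty stack, where B skips too
    intro ob db stk rest h1 hk hp ho hstk hbp hbo
    have hdc : s.drop c = s[c] :: s.drop (c + 1) := List.drop_eq_getElem_cons h
    have hc0 : pvCStep 0 s[c] = 0 := by simp [pvCStep, hpar]
    have h1' : (stk = [] ∧ ob = o ∧ db = d0 ∧ pvCBal (s.drop (c + 1)) = 0) ∨
        (stk.head? = some (o, d0) ∧ pvNNB (s.drop (c + 1))) := by
      rcases h1 with ⟨he, ho1, ho2, hcb⟩ | ⟨hh, hnnb⟩
      · refine Or.inl ⟨he, ho1, ho2, ?_⟩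
        rw [hdc] at hcb
        simpa only [pvCBal, List.foldl_cons, hc0] using hcb
      · refine Or.inr ⟨hh, ?_⟩
        rw [hdc] at hnnb
        by_cases hrp : s[c] = ')'
        · exact absurd (hrp ▸ hnnb) (fun hx => pvNNB_not_rparen _ hx)
        · exact pvNNB_tail _ _ (by simp [pvW, hpar, hrp]) hnnb
    rw [hdc]
    by_cases hrp : s[c] = ')'
    · have hemp : stk = [] := by
        rcases h1 with ⟨he, _, _, _⟩ | ⟨_, hnnb⟩
        · exact he
        · exact absurd (by rw [hdc, hrp] at hnnb; exact hnnb) (fun hx => pvNNB_not_rparen _ hx)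
      subst hemp
      simp only [List.cons_append, pvLoopB, hdir, hbar, hpar, hrp, if_false, if_true]
      exact ih ob db [] rest h1' hk hp ho hstk (by omega) (by omega)
    · simp only [List.cons_append, pvLoopB, hdir, hbar, hpar, hrp, if_false]
      exact ih ob db stk rest h1' hk hp ho hstk (by omega) (by omega)
  | case7 s c pos dist o d0 st h =>
    intro ob db stk rest h1 hk hp ho hstk hbp hbo
    have hdc : s.drop c = ([] : List Char) := List.drop_eq_nil_of_le (by omega)
    rw [hdc]
    rfl

-- initial state facts for the wrappers
theorem pvInit_keyed (vl : List (Int × Int)) (dl : List (Int × Int × Int))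
    (origin : Int × Int) (d0 : Int) (N : Nat)
    (hsub : ∀ p ∈ vl, p ∈ dl.map (fun t => (t.1, t.2.1)) ∨ N < pvL1 origin p) :
    pvKeyed origin N (PySem.Set.add (PySem.Set.ofList vl) origin,
      (PySem.Dict.ofList (dl.map (fun t => ((t.1, t.2.1), t.2.2)))).insert origin d0) := by
  set d := PySem.Dict.ofList (dl.map (fun t => ((t.1, t.2.1), t.2.2))) with hd
  have hnd : d.keys.Nodup := PySem.Dict.nodup_keys_ofList _
  constructor
  · exact PySem.Dict.nodup_keys_insert _ _ _ hnd
  · intro p hpm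
    rcases (PySem.Set.mem_add _ _ _).1 hpm with hps | hpe
    · have hpv : p ∈ vl := (PySem.Set.mem_ofList _ _).1 hps
      rcases hsub p hpv with hmem | hfar
      · have hpk : p ∈ d.keys := by
          rw [hd]
          simp only [PySem.Dict.ofList, PySem.Dict.update]
          rw [PySem.Dict.keys_foldl_insert_key]
          simp only [PySem.Dict.keys_empty]
          rw [PySem.Set.update_nil_left, PySem.Set.mem_ofList]
          simp only [List.map_map]
          obtain ⟨t, ht, hteq⟩ := List.mem_map.1 hmem
          exact List.mem_map.2 ⟨t, ht, by simp [← hteq]⟩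
        by_cases hpo : p = origin
        · exact Or.inl ⟨d0, by rw [hpo]; exact PySem.Dict.get?_insert_self _ _ _⟩
        · rcases hv : d.get? p with _ | v
          · exact absurd ((PySem.Dict.get?_eq_none_iff_not_mem_keys d p).1 hv) (by simp [hpk])
          · exact Or.inl ⟨v, by rw [PySem.Dict.get?_insert_of_ne _ _ hpo, hv]⟩
      · exact Or.inr hfar
    · exact Or.inl ⟨d0, by rw [hpe]; exact PySem.Dict.get?_insert_self _ _ _⟩

-- ===== VERDICT (by name: the statement is the Claim_ definition above) =====
theorem goThrough_spec : Claim_equal_goThrough := by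
  unfold Claim_equal_goThrough
  intro regex d0 origin visited distances _ hpre
  obtain ⟨hbal, hsub⟩ := hpre
  unfold Spec_goThrough goThrough goThrough_alt
  set st0 : PvSt := (PySem.Set.add (PySem.Set.ofList (visited.getD [])) origin,
    (PySem.Dict.ofList ((distances.getD []).map (fun t => ((t.1, t.2.1), t.2.2)))).insert
      origin d0) with hst0
  have hk : pvKeyed origin regex.toList.length st0 :=
    pvInit_keyed (visited.getD []) (distances.getD []) origin d0 regex.toList.length hsub
  have hg : pvGood st0 (origin, d0) :=
    ⟨(PySem.Set.mem_add _ _ _).2 (Or.inr rfl), PySem.Dict.get?_insert_self _ _ _⟩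
  have hb0 : pvL1 origin origin + (regex.toList.length - 0) ≤ regex.toList.length := by
    simp [pvL1]
  have hM := pvM origin regex.toList.length regex.toList 0 origin d0 origin d0 st0
    origin d0 [] []
    (Or.inl ⟨rfl, rfl, rfl, by simpa using hbal⟩) hk hg hg (by simp) hb0 hb0
  simp only [List.drop_zero, List.append_nil] at hM
  rw [hM]
  rfl
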